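-- pv_equiv track=rewrite | github.com/MarioGiagnotti/Informatica-terzo-anno-Python | Esercizi svolti/segnali/02_codifiche.py | codifica_AMI
-- ===== SOURCE A (Python) =====
-- def codifica_AMI(bits):
--     time, signal = [], []
--     last_polarity = -1
--     for i, bit in enumerate(bits):
--         time += [i, i+1]
--         if bit == '0':
--             signal += [0, 0]
--         else:
--             last_polarity *= -1
--             signal += [last_polarity, last_polarity]
--     return time, signal
-- ===== SOURCE B (Python) =====
-- def codifica_AMI(bits):
--     n = len(bits)
--     time = [t for i in range(n) for t in (i, i + 1)]
--     # first pass: cumulative count of non-'0' bits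
--     counts = []
--     c = 0
--     for b in bits:
--         c += (b != '0')
--         counts.append(c)
--     # second pass: polarity from parity of the cumulative count
--     sig = []
--     for b, c in zip(bits, counts):
--         sig += [0, 0] if b == '0' else ([1, 1] if c % 2 == 1 else [-1, -1])
--     return time, sig
-- ===== Notes on version B (the rewrite author's own statement) =====
-- stated objective: alternative
-- what changed: Replaces the single loop with a mutable running polarity by a range-driven time list plus two passes: a cumulative count of nonzero characters and a parity table lookup emitting +1/-1.
import Mathlib
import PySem

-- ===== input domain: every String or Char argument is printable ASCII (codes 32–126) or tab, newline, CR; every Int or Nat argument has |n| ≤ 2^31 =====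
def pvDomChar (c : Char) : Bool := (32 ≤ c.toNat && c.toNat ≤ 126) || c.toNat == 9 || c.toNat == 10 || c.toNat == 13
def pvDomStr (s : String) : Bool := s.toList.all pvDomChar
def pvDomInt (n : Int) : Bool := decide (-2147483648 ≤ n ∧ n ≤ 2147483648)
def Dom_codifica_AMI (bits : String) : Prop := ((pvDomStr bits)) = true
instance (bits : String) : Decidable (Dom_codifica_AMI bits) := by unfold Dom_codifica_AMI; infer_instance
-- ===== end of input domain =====

-- B replaces A's single loop with a running signed polarity by a range-built time list and
-- two passes (cumulative nonzero-character count, then a parity lookup); same O(n) cost, return value only.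

-- ===== PORT A =====
-- literal port of A: one loop over enumerate(bits) with state (time, signal, last_polarity)
def codifica_AMI (bits : String) : List Int × List Int :=
  let st := (PySem.List.enumerate bits.toList).foldl
    (fun (st : List Int × List Int × Int) (p : Int × Char) =>
      let time := st.1 ++ [p.1, p.1 + 1]
      if p.2 = '0' then
        (time, st.2.1 ++ [0, 0], st.2.2)
      else
        let lp := st.2.2 * (-1)
        (time, st.2.1 ++ [lp, lp], lp))
    ([], [], -1)
  (st.1, st.2.1)

-- ===== PORT B =====
-- literal port of Source B: time from range(n); first pass builds cumulative counts; second pass zips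
def codifica_AMI_alt (bits : String) : List Int × List Int :=
  let n : Int := bits.toList.length
  let time := (PySem.List.pyRange 0 n 1).flatMap (fun i => [i, i + 1])
  let cs := bits.toList.foldl
    (fun (acc : List Int × Int) (b : Char) =>
      let c := acc.2 + (if b ≠ '0' then 1 else 0)
      (acc.1 ++ [c], c)) ([], 0)
  let signal := (bits.toList.zip cs.1).foldl
    (fun (s : List Int) (p : Char × Int) =>
      s ++ (if p.1 = '0' then [0, 0]
            else if PySem.Int.mod p.2 2 = 1 then [1, 1] else [-1, -1])) []
  (time, signal)

-- ===== PRECONDITION & SPEC =====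
def Spec_codifica_AMI (bits : String) (out : List Int × List Int) : Prop := out = codifica_AMI_alt bits
instance (bits : String) (out : List Int × List Int) : Decidable (Spec_codifica_AMI bits out) := by unfold Spec_codifica_AMI; infer_instance

-- ===== CLAIM (what is proved, stated in full; the proofs are below) =====
def Claim_equal_codifica_AMI : Prop := ∀ (bits : String), Dom_codifica_AMI bits → Spec_codifica_AMI bits (codifica_AMI bits)

-- ===== LEMMAS AND PROOFS =====

-- named copies of the three loop bodies (definitionally equal to the lambdas in the ports)
def pvStepA (st : List Int × List Int × Int) (p : Int × Char) : List Int × List Int × Int :=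
  let time := st.1 ++ [p.1, p.1 + 1]
  if p.2 = '0' then
    (time, st.2.1 ++ [0, 0], st.2.2)
  else
    let lp := st.2.2 * (-1)
    (time, st.2.1 ++ [lp, lp], lp)

def pvStepC (acc : List Int × Int) (b : Char) : List Int × Int :=
  let c := acc.2 + (if b ≠ '0' then 1 else 0)
  (acc.1 ++ [c], c)

def pvStepZ (s : List Int) (p : Char × Int) : List Int :=
  s ++ (if p.1 = '0' then [0, 0]
        else if PySem.Int.mod p.2 2 = 1 then [1, 1] else [-1, -1])

theorem codifica_AMI_eq (bits : String) :
    codifica_AMI bits =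
      (let st := (PySem.List.enumerate bits.toList).foldl pvStepA ([], [], -1)
       (st.1, st.2.1)) := rfl

theorem codifica_AMI_alt_eq (bits : String) :
    codifica_AMI_alt bits =
      ((PySem.List.pyRange 0 (bits.toList.length : Int) 1).flatMap (fun i => [i, i + 1]),
       (bits.toList.zip (bits.toList.foldl pvStepC ([], 0)).1).foldl pvStepZ []) := rfl

-- polarity determined by parity of the cumulative count of non-'0' bits
def pvPol (c : Int) : Int := if PySem.Int.mod c 2 = 1 then 1 else -1

-- reference signal: B's shape, parameterised by the count consumed so far
def pvSig : List Char → Int → List Int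
  | [], _ => []
  | b :: bs, c =>
    if b = '0' then 0 :: 0 :: pvSig bs c
    else pvPol (c + 1) :: pvPol (c + 1) :: pvSig bs (c + 1)

-- B's cumulative-counts list
def pvCounts : List Char → Int → List Int
  | [], _ => []
  | b :: bs, c =>
    (c + (if b ≠ '0' then 1 else 0)) :: pvCounts bs (c + (if b ≠ '0' then 1 else 0))

theorem pvMod_two (a : Int) : PySem.Int.mod a 2 = a % 2 :=
  PySem.Int.mod_eq_emod_of_pos (by norm_num)

theorem pvPol_succ (c : Int) : pvPol (c + 1) = pvPol c * (-1) := by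
  simp only [pvPol, pvMod_two]
  split_ifs with h1 h2 <;> omega

-- A's loop, fully characterised: time is the flattened enumerate indices, signal is pvSig,
-- and the carried polarity equals pvPol of the count consumed so far.
theorem pvFoldA (l : List Char) : ∀ (s : Int) (T S : List Int) (c : Int),
    (PySem.List.enumerate l s).foldl pvStepA (T, S, pvPol c)
    = (T ++ (PySem.List.enumerate l s).flatMap (fun p => [p.1, p.1 + 1]),
       S ++ pvSig l c,
       pvPol (c + (l.countP (fun b => !(b = '0')) : Int))) := by
  induction l with
  | nil => intro s T S c; simp [PySem.List.enumerate_nil]; rfl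
  | cons b bs ih =>
    intro s T S c
    rw [PySem.List.enumerate_cons, List.foldl_cons]
    by_cases hb : b = '0'
    · have hstep : pvStepA (T, S, pvPol c) (s, b) = (T ++ [s, s + 1], S ++ [0, 0], pvPol c) := by
        simp [pvStepA, hb]
      rw [hstep, ih]
      simp [pvSig, hb, List.append_assoc]
    · have hstep : pvStepA (T, S, pvPol c) (s, b)
          = (T ++ [s, s + 1], S ++ [pvPol (c + 1), pvPol (c + 1)], pvPol (c + 1)) := by
        simp [pvStepA, hb, pvPol_succ]
      rw [hstep, ih]
      simp only [pvSig, if_neg hb, List.flatMap_cons, List.countP_cons, Prod.mk.injEq]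
      refine ⟨by simp [List.append_assoc], by simp [List.append_assoc], ?_⟩
      simp only [hb, decide_false, Bool.not_false]
      congr 1
      push_cast
      ring

-- B's first pass builds pvCounts
theorem pvFoldCounts (l : List Char) : ∀ (L : List Int) (c : Int),
    l.foldl pvStepC (L, c)
    = (L ++ pvCounts l c, c + (l.countP (fun b => !(b = '0')) : Int)) := by
  induction l with
  | nil => intro L c; simp [pvCounts]
  | cons b bs ih =>
    intro L c
    rw [List.foldl_cons]
    have hstep : pvStepC (L, c) b
        = (L ++ [c + (if b ≠ '0' then 1 else 0)], c + (if b ≠ '0' then 1 else 0)) := rfl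
    rw [hstep, ih]
    simp only [pvCounts, List.countP_cons]
    by_cases hb : b = '0' <;> simp [hb, List.append_assoc] <;> ring

-- B's second pass over the zip with pvCounts produces pvSig
theorem pvFoldZip (l : List Char) : ∀ (S : List Int) (c : Int),
    (l.zip (pvCounts l c)).foldl pvStepZ S = S ++ pvSig l c := by
  induction l with
  | nil => intro S c; simp [pvCounts, pvSig]
  | cons b bs ih =>
    intro S c
    by_cases hb : b = '0'
    · have hstep : pvStepZ S (b, c + (if b ≠ '0' then 1 else 0)) = S ++ [0, 0] := by
        simp [pvStepZ, hb]
      simp only [pvCounts, List.zip_cons_cons, List.foldl_cons]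
      rw [hstep, ih]
      simp [pvSig, hb, List.append_assoc]
    · have hval : (if b ≠ '0' then (1 : Int) else 0) = 1 := by simp [hb]
      have hstep : pvStepZ S (b, c + 1) = S ++ [pvPol (c + 1), pvPol (c + 1)] := by
        simp only [pvStepZ, pvPol, if_neg hb]
        split_ifs <;> rfl
      simp only [pvCounts, hval, List.zip_cons_cons, List.foldl_cons]
      rw [hstep, ih]
      simp [pvSig, hb, List.append_assoc]

-- A's time (flatMap over enumerate) equals B's time (flatMap over range)
theorem pvTime_eq (l : List Char) :
    (PySem.List.enumerate l 0).flatMap (fun p => [p.1, p.1 + 1])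
    = (PySem.List.pyRange 0 (l.length : Int) 1).flatMap (fun i => [i, i + 1]) := by
  have h := PySem.List.map_fst_enumerate l 0
  calc (PySem.List.enumerate l 0).flatMap (fun p => [p.1, p.1 + 1])
      = ((PySem.List.enumerate l 0).map (·.1)).flatMap (fun i => [i, i + 1]) := by
        rw [List.flatMap_map]
    _ = (PySem.List.pyRange 0 (l.length : Int) 1).flatMap (fun i => [i, i + 1]) := by
        rw [h]; norm_num

-- ===== VERDICT (by name: the statement is the Claim_ definition above) =====
theorem codifica_AMI_spec : Claim_equal_codifica_AMI := by
  intro bits _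
  unfold Spec_codifica_AMI
  rw [codifica_AMI_eq, codifica_AMI_alt_eq]
  have hpol0 : pvPol 0 = -1 := by decide
  have hA := pvFoldA bits.toList 0 [] [] 0
  rw [hpol0] at hA
  simp only [hA, pvFoldCounts bits.toList [] 0, List.nil_append]
  rw [pvFoldZip bits.toList [] 0, pvTime_eq]
  simp
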